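-- pv_equiv track=rewrite | github.com/himinqq/algorithm_py | check_dist.py | solution
-- ===== SOURCE A (Python) =====
-- from collections import deque
--
-- def solution(places):
--     answer = []
--
--     dx = [-1, 1, 0, 0]
--     dy = [0, 0, -1, 1]
--     cx = [-1, -1, 1, 1]
--     cy = [-1, 1, -1, 1]
--
--     n, m = len(places), len(places[0])
--     for place in places:
--         flag = True
--         for x in range(n):
--             for y in range(m):
--                 walls = deque()
--                 if place[x][y] == 'P':
--                     # 바로 옆자리에 사람 있는지 확인
--                     for i in range(4):
--                         nx, ny = x + dx[i], y + dy[i]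
--                         if nx < 0 or nx >= n or ny < 0 or ny >= m:
--                             continue
--                         if place[nx][ny] == 'P':
--                             flag = False
--                             break
--                         if place[nx][ny] == 'X':
--                             walls.append((nx, ny))
--                         # P O P 같이 빈칸 두고 옆자리 앉은 경우
--                         nx, ny = x + dx[i] * 2, y + dy[i] * 2
--                         mx, my = x + dx[i], y + dy[i] # 중간 칸 확인
--                         if nx < 0 or nx >= n or ny < 0 or ny >= m:
--                             continue
--                         if place[nx][ny] == 'P' and place[mx][my] != 'X':
--                             flag = False
--                             break
--
--                     # 대각선에 사람 있는지 확인
--                     for i in range(4):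
--                         nx, ny = x + cx[i], y + cy[i]
--                         if nx < 0 or nx >= n or ny < 0 or ny >= m:
--                             continue
--                         if place[nx][ny] == 'P':
--                             if (nx, y) in walls and (x, ny) in walls:
--                                 continue
--                             else:
--                                 flag = False
--                                 break
--                 if not flag:
--                     break
--             if not flag:
--                 break
--         if not flag:
--             answer.append(0)
--         else:
--             answer.append(1)
--
--     return answer
-- ===== SOURCE B (Python) =====
-- def solution(places):
--     # BFS up to distance 2 from each P, walls 'X' block movement; same n x m grid view as the original.
--     n, m = len(places), len(places[0])
--     nbrs = ((-1, 0), (1, 0), (0, -1), (0, 1))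
--
--     def near_p(place, sx, sy):
--         seen = {(sx, sy)}
--         frontier = [(sx, sy)]
--         for _ in range(2):
--             nxt = []
--             for cx, cy in frontier:
--                 for dx, dy in nbrs:
--                     q = (cx + dx, cy + dy)
--                     if 0 <= q[0] < n and 0 <= q[1] < m and q not in seen:
--                         seen.add(q)
--                         if place[q[0]][q[1]] == 'P':
--                             return True
--                         if place[q[0]][q[1]] != 'X':
--                             nxt.append(q)
--             frontier = nxt
--         return False
--
--     return [0 if any(near_p(place, x, y)
--                      for x in range(n) for y in range(m)
--                      if place[x][y] == 'P')
--             else 1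
--             for place in places]
-- ===== Notes on version B (the rewrite author's own statement) =====
-- stated objective: idiomatic
-- what changed: Replaces A's explicit dx/dy offset probes (adjacent, distance-2 straight, diagonal) with a walls-deque for the diagonal rule by a single uniform bounded BFS of depth 2 from each 'P' with a visited set, where 'X' cells block expansion.
-- outside the precondition, e.g. on solution([['PP', 'XXP', 'X']]): A returns [0], B returns [0]
import Mathlib
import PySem

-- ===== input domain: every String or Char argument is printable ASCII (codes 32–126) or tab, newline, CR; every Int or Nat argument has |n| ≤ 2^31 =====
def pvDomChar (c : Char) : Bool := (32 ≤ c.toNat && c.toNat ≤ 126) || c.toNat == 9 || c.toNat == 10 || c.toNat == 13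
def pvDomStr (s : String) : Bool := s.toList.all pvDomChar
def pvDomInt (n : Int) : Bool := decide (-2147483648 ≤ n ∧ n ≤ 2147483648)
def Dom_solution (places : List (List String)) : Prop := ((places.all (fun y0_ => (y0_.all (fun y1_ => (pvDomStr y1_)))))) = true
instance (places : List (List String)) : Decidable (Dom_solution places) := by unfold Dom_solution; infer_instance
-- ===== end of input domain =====

-- B replaces A's explicit dx/dy offset probes and walls-deque diagonal bookkeeping by a bounded
-- wall-aware BFS (distance ≤ 2) from each 'P'; objective: idiomatic, not faster.

-- ===== PORT A =====
-- shared cell accessor: place[x][y]; total via default ' ', only evaluated on in-range indices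
-- inside Pre_ (both Pythons guard every access with the same bounds tests).
def pvCell (place : List String) (x y : Int) : Char :=
  ((PySem.List.pyGet? place x).bind (fun s => PySem.Str.pyGet? s y)).getD ' '

def pvDx : List Int := [-1, 1, 0, 0]
def pvDy : List Int := [0, 0, -1, 1]
def pvCx : List Int := [-1, -1, 1, 1]
def pvCy : List Int := [-1, 1, -1, 1]

-- A's first inner loop ('바로 옆자리'): adjacent and straight-distance-2 probes, collecting walls
def pvLoop1 (place : List String) (n m x y : Int) :
    List Nat → List (Int × Int) → Bool × List (Int × Int)
  | [], walls => (true, walls)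
  | i :: rest, walls =>
    let nx := x + pvDx.getD i 0
    let ny := y + pvDy.getD i 0
    if nx < 0 ∨ n ≤ nx ∨ ny < 0 ∨ m ≤ ny then pvLoop1 place n m x y rest walls
    else if pvCell place nx ny = 'P' then (false, walls)
    else
      let walls' := if pvCell place nx ny = 'X' then walls ++ [(nx, ny)] else walls
      let fx := x + pvDx.getD i 0 * 2
      let fy := y + pvDy.getD i 0 * 2
      if fx < 0 ∨ n ≤ fx ∨ fy < 0 ∨ m ≤ fy then pvLoop1 place n m x y rest walls'
      else if pvCell place fx fy = 'P' ∧ pvCell place nx ny ≠ 'X' then (false, walls')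
      else pvLoop1 place n m x y rest walls'

-- A's second inner loop ('대각선'): diagonal probes against the collected walls
def pvLoop2 (place : List String) (n m x y : Int) (walls : List (Int × Int)) :
    List Nat → Bool
  | [] => true
  | i :: rest =>
    let nx := x + pvCx.getD i 0
    let ny := y + pvCy.getD i 0
    if nx < 0 ∨ n ≤ nx ∨ ny < 0 ∨ m ≤ ny then pvLoop2 place n m x y walls rest
    else if pvCell place nx ny = 'P' then
      if (nx, y) ∈ walls ∧ (x, ny) ∈ walls then pvLoop2 place n m x y walls rest
      else false
    else pvLoop2 place n m x y walls rest

-- flag after handling one 'P' cell (the diagonal loop runs even when the first loop broke,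
-- exactly as in the Python; it can only keep the flag False there)
def pvCellCheck (place : List String) (n m x y : Int) : Bool :=
  let r := pvLoop1 place n m x y [0, 1, 2, 3] []
  r.1 && pvLoop2 place n m x y r.2 [0, 1, 2, 3]

-- 'for y in range(m)' with 'if not flag: break'
def pvRowCheck (place : List String) (n m x : Int) : List Int → Bool
  | [] => true
  | y :: rest =>
    if pvCell place x y = 'P' then
      if pvCellCheck place n m x y then pvRowCheck place n m x rest else false
    else pvRowCheck place n m x rest

-- 'for x in range(n)' with 'if not flag: break'
def pvPlaceCheck (place : List String) (n m : Int) : List Int → Bool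
  | [] => true
  | x :: rest =>
    if pvRowCheck place n m x (PySem.List.pyRange 0 m 1) then pvPlaceCheck place n m rest
    else false

def solution (places : List (List String)) : List Int :=
  let n : Int := places.length
  let m : Int := (places.headD []).length
  places.map (fun place =>
    if pvPlaceCheck place n m (PySem.List.pyRange 0 n 1) then 1 else 0)

-- ===== PORT B =====
def pvNbrs : List (Int × Int) := [(-1, 0), (1, 0), (0, -1), (0, 1)]

-- expand one frontier cell over the four neighbour offsets (early True on a 'P')
def pvExpandCell (place : List String) (n m : Int) (c : Int × Int) :
    List (Int × Int) → PySem.Set (Int × Int) → List (Int × Int) →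
    Bool × PySem.Set (Int × Int) × List (Int × Int)
  | [], seen, nxt => (false, seen, nxt)
  | d :: rest, seen, nxt =>
    let q : Int × Int := (c.1 + d.1, c.2 + d.2)
    if 0 ≤ q.1 ∧ q.1 < n ∧ 0 ≤ q.2 ∧ q.2 < m ∧ q ∉ seen then
      let seen' := PySem.Set.add seen q
      if pvCell place q.1 q.2 = 'P' then (true, seen', nxt)
      else if pvCell place q.1 q.2 ≠ 'X' then pvExpandCell place n m c rest seen' (nxt ++ [q])
      else pvExpandCell place n m c rest seen' nxt
    else pvExpandCell place n m c rest seen nxt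

-- expand a whole frontier (early True)
def pvExpandFrontier (place : List String) (n m : Int) :
    List (Int × Int) → PySem.Set (Int × Int) → List (Int × Int) →
    Bool × PySem.Set (Int × Int) × List (Int × Int)
  | [], seen, nxt => (false, seen, nxt)
  | c :: rest, seen, nxt =>
    let r := pvExpandCell place n m c pvNbrs seen nxt
    if r.1 then r else pvExpandFrontier place n m rest r.2.1 r.2.2

-- 'for _ in range(2)' of Source B's near_p
def pvLevels (place : List String) (n m : Int) :
    Nat → List (Int × Int) → PySem.Set (Int × Int) → Bool
  | 0, _, _ => false
  | k + 1, fr, seen =>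
    let r := pvExpandFrontier place n m fr seen []
    if r.1 then true else pvLevels place n m k r.2.2 r.2.1

def pvNearP (place : List String) (n m sx sy : Int) : Bool :=
  pvLevels place n m 2 [(sx, sy)] (PySem.Set.ofList [(sx, sy)])

def solution_alt (places : List (List String)) : List Int :=
  let n : Int := places.length
  let m : Int := (places.headD []).length
  places.map (fun place =>
    if (PySem.List.pyRange 0 n 1).any (fun x =>
        (PySem.List.pyRange 0 m 1).any (fun y =>
          pvCell place x y = 'P' && pvNearP place n m x y)) then 0 else 1)

-- ===== PRECONDITION & SPEC =====
-- Pre_ excludes the empty list (A indexes places[0]) and misshapen inputs — a place with fewer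
-- than len(places) rows or a scanned row shorter than len(places[0]) — where A in general hits
-- an IndexError (on a few such inputs an early break lets A return anyway; those accidental
-- returns are excluded with them).
def Pre_solution (places : List (List String)) : Prop :=
  places ≠ [] ∧
  ((places.headD []).length = 0 ∨
    ∀ p ∈ places, places.length ≤ p.length ∧
      ∀ s ∈ p.take places.length, ((places.headD []).length : Int) ≤ PySem.Str.len s)
instance (places : List (List String)) : Decidable (Pre_solution places) := by
  unfold Pre_solution; infer_instance

def pvWitness_solution : List (List String) :=
  [["POP", "OOO", "POX"], ["PPP", "OOO", "OOO"], ["OOO", "OOO", "OOO"]]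

def Spec_solution (places : List (List String)) (out : List Int) : Prop := out = solution_alt places
instance (places : List (List String)) (out : List Int) : Decidable (Spec_solution places out) := by unfold Spec_solution; infer_instance

-- ===== CLAIM (what is proved, stated in full; the proofs are below) =====
def Claim_equal_solution : Prop := ∀ (places : List (List String)), Dom_solution places → Pre_solution places → Spec_solution places (solution places)

-- ===== LEMMAS AND PROOFS =====

-- in-bounds predicate of both Pythons' guards
def pvInb (n m : Int) (q : Int × Int) : Prop := 0 ≤ q.1 ∧ q.1 < n ∧ 0 ≤ q.2 ∧ q.2 < m


def pvDiag : List (Int × Int) := [(-1, -1), (-1, 1), (1, -1), (1, 1)]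

-- the common "some P too close" specification both per-cell routines are reduced to
def pvAdjBad (place : List String) (n m x y : Int) : Prop :=
  ∃ d ∈ pvNbrs, pvInb n m (x + d.1, y + d.2) ∧ pvCell place (x + d.1) (y + d.2) = 'P'

def pvFarBad (place : List String) (n m x y : Int) : Prop :=
  ∃ d ∈ pvNbrs, pvInb n m (x + d.1, y + d.2) ∧
    pvCell place (x + d.1) (y + d.2) ≠ 'X' ∧ pvCell place (x + d.1) (y + d.2) ≠ 'P' ∧
    pvInb n m (x + d.1 * 2, y + d.2 * 2) ∧ pvCell place (x + d.1 * 2) (y + d.2 * 2) = 'P'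

def pvDiagBad (place : List String) (n m x y : Int) : Prop :=
  ∃ d ∈ pvDiag, pvInb n m (x + d.1, y + d.2) ∧ pvCell place (x + d.1) (y + d.2) = 'P' ∧
    ((pvCell place (x + d.1) y ≠ 'X' ∧ pvCell place (x + d.1) y ≠ 'P') ∨
     (pvCell place x (y + d.2) ≠ 'X' ∧ pvCell place x (y + d.2) ≠ 'P'))

def pvBad (place : List String) (n m x y : Int) : Prop :=
  pvAdjBad place n m x y ∨ pvFarBad place n m x y ∨ pvDiagBad place n m x y

-- ---- A-side reductions ----

def pvStepBad (place : List String) (n m x y : Int) (d : Int × Int) : Prop :=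
  pvInb n m (x + d.1, y + d.2) ∧
    (pvCell place (x + d.1) (y + d.2) = 'P' ∨
      (pvInb n m (x + d.1 * 2, y + d.2 * 2) ∧ pvCell place (x + d.1 * 2) (y + d.2 * 2) = 'P' ∧
        pvCell place (x + d.1) (y + d.2) ≠ 'X'))

theorem pvInb_mk (n m a b : Int) : pvInb n m (a, b) ↔ (0 ≤ a ∧ a < n ∧ 0 ≤ b ∧ b < m) :=
  Iff.rfl

theorem pvLoop1_flag (place : List String) (n m x y : Int) (is : List Nat) :
    ∀ walls, (pvLoop1 place n m x y is walls).1 = true ↔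
      ∀ i ∈ is, ¬ pvStepBad place n m x y (pvDx.getD i 0, pvDy.getD i 0) := by
  induction is with
  | nil => intro walls; simp [pvLoop1]
  | cons i rest ih =>
    intro walls
    simp only [pvLoop1, List.forall_mem_cons]
    by_cases h1 : x + pvDx.getD i 0 < 0 ∨ n ≤ x + pvDx.getD i 0 ∨
        y + pvDy.getD i 0 < 0 ∨ m ≤ y + pvDy.getD i 0
    · rw [if_pos h1, ih]
      have hstep : ¬ pvStepBad place n m x y (pvDx.getD i 0, pvDy.getD i 0) := by
        rintro ⟨hi, _⟩
        rw [pvInb_mk] at hi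
        rcases h1 with h | h | h | h <;> omega
      exact ⟨fun h => ⟨hstep, h⟩, And.right⟩
    · rw [if_neg h1]
      rw [not_or, not_or, not_or] at h1
      have hinb : pvInb n m ((x + pvDx.getD i 0, y + pvDy.getD i 0) : Int × Int) := by
        rw [pvInb_mk]
        omega
      by_cases h2 : pvCell place (x + pvDx.getD i 0) (y + pvDy.getD i 0) = 'P'
      · rw [if_pos h2]
        exact iff_of_false (by simp) (fun hc => hc.1 ⟨hinb, Or.inl h2⟩)
      · rw [if_neg h2]
        by_cases h3 : x + pvDx.getD i 0 * 2 < 0 ∨ n ≤ x + pvDx.getD i 0 * 2 ∨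
            y + pvDy.getD i 0 * 2 < 0 ∨ m ≤ y + pvDy.getD i 0 * 2
        · rw [if_pos h3, ih]
          have hstep : ¬ pvStepBad place n m x y (pvDx.getD i 0, pvDy.getD i 0) := by
            rintro ⟨_, hP | ⟨hfi, _, _⟩⟩
            · exact h2 hP
            · rw [pvInb_mk] at hfi
              rcases h3 with h | h | h | h <;> omega
          exact ⟨fun h => ⟨hstep, h⟩, And.right⟩
        · rw [if_neg h3]
          rw [not_or, not_or, not_or] at h3
          have hfinb : pvInb n m ((x + pvDx.getD i 0 * 2, y + pvDy.getD i 0 * 2) : Int × Int) := by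
            rw [pvInb_mk]
            omega
          by_cases h4 : pvCell place (x + pvDx.getD i 0 * 2) (y + pvDy.getD i 0 * 2) = 'P' ∧
              pvCell place (x + pvDx.getD i 0) (y + pvDy.getD i 0) ≠ 'X'
          · rw [if_pos h4]
            exact iff_of_false (by simp)
              (fun hc => hc.1 ⟨hinb, Or.inr ⟨hfinb, h4.1, h4.2⟩⟩)
          · rw [if_neg h4, ih]
            have hstep : ¬ pvStepBad place n m x y (pvDx.getD i 0, pvDy.getD i 0) := by
              rintro ⟨_, hP | ⟨_, hfP, hmX⟩⟩
              · exact h2 hP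
              · exact h4 ⟨hfP, hmX⟩
            exact ⟨fun h => ⟨hstep, h⟩, And.right⟩
def pvWallsOf (place : List String) (n m x y : Int) (is : List Nat) : List (Int × Int) :=
  is.filterMap (fun i =>
    let a : Int × Int := (x + pvDx.getD i 0, y + pvDy.getD i 0)
    if 0 ≤ a.1 ∧ a.1 < n ∧ 0 ≤ a.2 ∧ a.2 < m ∧ pvCell place a.1 a.2 = 'X' then some a
    else none)

theorem pvLoop1_walls (place : List String) (n m x y : Int) (is : List Nat) :
    ∀ walls, (pvLoop1 place n m x y is walls).1 = true →
      (pvLoop1 place n m x y is walls).2 = walls ++ pvWallsOf place n m x y is := by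
  induction is with
  | nil => intro walls _; simp [pvLoop1, pvWallsOf]
  | cons i rest ih =>
    intro walls
    have hwcons : pvWallsOf place n m x y (i :: rest) =
        (if 0 ≤ x + pvDx.getD i 0 ∧ x + pvDx.getD i 0 < n ∧ 0 ≤ y + pvDy.getD i 0 ∧
            y + pvDy.getD i 0 < m ∧ pvCell place (x + pvDx.getD i 0) (y + pvDy.getD i 0) = 'X'
          then [((x + pvDx.getD i 0, y + pvDy.getD i 0) : Int × Int)] else []) ++
        pvWallsOf place n m x y rest := by
      simp only [pvWallsOf, List.filterMap_cons]
      by_cases hc : 0 ≤ x + pvDx.getD i 0 ∧ x + pvDx.getD i 0 < n ∧ 0 ≤ y + pvDy.getD i 0 ∧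
          y + pvDy.getD i 0 < m ∧ pvCell place (x + pvDx.getD i 0) (y + pvDy.getD i 0) = 'X'
      · rw [if_pos hc, if_pos hc]
        rfl
      · rw [if_neg hc, if_neg hc]
        rfl
    rw [hwcons]
    simp only [pvLoop1]
    by_cases h1 : x + pvDx.getD i 0 < 0 ∨ n ≤ x + pvDx.getD i 0 ∨
        y + pvDy.getD i 0 < 0 ∨ m ≤ y + pvDy.getD i 0
    · rw [if_pos h1]
      have hni : ¬ (0 ≤ x + pvDx.getD i 0 ∧ x + pvDx.getD i 0 < n ∧ 0 ≤ y + pvDy.getD i 0 ∧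
          y + pvDy.getD i 0 < m ∧ pvCell place (x + pvDx.getD i 0) (y + pvDy.getD i 0) = 'X') := by
        rintro ⟨ha, hb, hcc, hdd, _⟩
        rcases h1 with h | h | h | h <;> omega
      rw [if_neg hni, List.nil_append]
      exact ih walls
    · rw [if_neg h1]
      rw [not_or, not_or, not_or] at h1
      have hinb : pvInb n m ((x + pvDx.getD i 0, y + pvDy.getD i 0) : Int × Int) := by
        rw [pvInb_mk]
        omega
      by_cases h2 : pvCell place (x + pvDx.getD i 0) (y + pvDy.getD i 0) = 'P'
      · rw [if_pos h2]
        intro hf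
        exact absurd hf (by simp)
      · rw [if_neg h2]
        by_cases hX : pvCell place (x + pvDx.getD i 0) (y + pvDy.getD i 0) = 'X'
        · have hcx : 0 ≤ x + pvDx.getD i 0 ∧ x + pvDx.getD i 0 < n ∧ 0 ≤ y + pvDy.getD i 0 ∧
              y + pvDy.getD i 0 < m ∧
              pvCell place (x + pvDx.getD i 0) (y + pvDy.getD i 0) = 'X' :=
            ⟨by omega, by omega, by omega, by omega, hX⟩
          rw [if_pos hX, if_pos hcx, List.singleton_append]
          by_cases h3 : x + pvDx.getD i 0 * 2 < 0 ∨ n ≤ x + pvDx.getD i 0 * 2 ∨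
              y + pvDy.getD i 0 * 2 < 0 ∨ m ≤ y + pvDy.getD i 0 * 2
          · rw [if_pos h3]
            intro hf
            rw [ih _ hf, List.append_assoc, List.singleton_append]
          · rw [if_neg h3]
            have hn4 : ¬ (pvCell place (x + pvDx.getD i 0 * 2) (y + pvDy.getD i 0 * 2) = 'P' ∧
                pvCell place (x + pvDx.getD i 0) (y + pvDy.getD i 0) ≠ 'X') :=
              fun hc => hc.2 hX
            rw [if_neg hn4]
            intro hf
            rw [ih _ hf, List.append_assoc, List.singleton_append]
        · have hcx : ¬ (0 ≤ x + pvDx.getD i 0 ∧ x + pvDx.getD i 0 < n ∧ 0 ≤ y + pvDy.getD i 0 ∧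
              y + pvDy.getD i 0 < m ∧
              pvCell place (x + pvDx.getD i 0) (y + pvDy.getD i 0) = 'X') :=
            fun hc => hX hc.2.2.2.2
          rw [if_neg hX, if_neg hcx, List.nil_append]
          by_cases h3 : x + pvDx.getD i 0 * 2 < 0 ∨ n ≤ x + pvDx.getD i 0 * 2 ∨
              y + pvDy.getD i 0 * 2 < 0 ∨ m ≤ y + pvDy.getD i 0 * 2
          · rw [if_pos h3]
            exact ih walls
          · rw [if_neg h3]
            by_cases h4 : pvCell place (x + pvDx.getD i 0 * 2) (y + pvDy.getD i 0 * 2) = 'P' ∧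
                pvCell place (x + pvDx.getD i 0) (y + pvDy.getD i 0) ≠ 'X'
            · rw [if_pos h4]
              intro hf
              exact absurd hf (by simp)
            · rw [if_neg h4]
              exact ih walls
theorem pvMem_wallsOf (place : List String) (n m x y : Int) (p : Int × Int)
    (hp : ∃ d ∈ pvNbrs, p = (x + d.1, y + d.2)) :
    p ∈ pvWallsOf place n m x y [0, 1, 2, 3] ↔
      pvInb n m p ∧ pvCell place p.1 p.2 = 'X' := by
  rcases hp with ⟨d, hd, rfl⟩
  simp only [pvNbrs, List.mem_cons, List.not_mem_nil, or_false] at hd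
  rcases hd with rfl | rfl | rfl | rfl <;>
    simp [pvWallsOf, List.mem_filterMap, pvDx, pvDy, pvInb, Prod.ext_iff] <;>
    (try tauto)

theorem pvLoop2_iff (place : List String) (n m x y : Int) (walls : List (Int × Int))
    (is : List Nat) :
    pvLoop2 place n m x y walls is = true ↔
      ∀ i ∈ is, ¬ (pvInb n m (x + pvCx.getD i 0, y + pvCy.getD i 0) ∧
        pvCell place (x + pvCx.getD i 0) (y + pvCy.getD i 0) = 'P' ∧
        ¬ ((x + pvCx.getD i 0, y) ∈ walls ∧ (x, y + pvCy.getD i 0) ∈ walls)) := by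
  induction is with
  | nil => simp [pvLoop2]
  | cons i rest ih =>
    simp only [pvLoop2]
    split_ifs with h1 h2 h3 <;>
      simp_all [pvInb] <;> omega

theorem pvNbrs_fact (d : Int × Int) (hd : d ∈ pvNbrs) :
    (d.2 = 0 ∧ (d.1 = 1 ∨ d.1 = -1)) ∨ (d.1 = 0 ∧ (d.2 = 1 ∨ d.2 = -1)) := by
  fin_cases hd <;> simp

theorem pvDiag_fact (d : Int × Int) (hd : d ∈ pvDiag) :
    (d.1 = 1 ∨ d.1 = -1) ∧ (d.2 = 1 ∨ d.2 = -1) := by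
  fin_cases hd <;> simp

theorem pvMemNbrs (a b : Int)
    (h : (b = 0 ∧ (a = 1 ∨ a = -1)) ∨ (a = 0 ∧ (b = 1 ∨ b = -1))) :
    ((a, b) : Int × Int) ∈ pvNbrs := by
  rcases h with ⟨rfl, rfl | rfl⟩ | ⟨rfl, rfl | rfl⟩ <;> simp [pvNbrs]

theorem pvMemDiag (a b : Int) (h1 : a = 1 ∨ a = -1) (h2 : b = 1 ∨ b = -1) :
    ((a, b) : Int × Int) ∈ pvDiag := by
  rcases h1 with rfl | rfl <;> rcases h2 with rfl | rfl <;> simp [pvDiag]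

theorem pvOff_ne (d : Int × Int) (hd : d ∈ pvNbrs) (x y : Int) :
    ((x + d.1, y + d.2) : Int × Int) ≠ (x, y) := by
  rcases pvNbrs_fact d hd with ⟨h2, h1⟩ | ⟨h1, h2⟩ <;>
    (intro he; rw [Prod.mk.injEq] at he; omega)

theorem pvNoAdj (place : List String) (n m x y : Int) (h : ¬ pvAdjBad place n m x y) :
    ∀ d ∈ pvNbrs, pvInb n m (x + d.1, y + d.2) → pvCell place (x + d.1) (y + d.2) ≠ 'P' := by
  intro d hd hi hP
  exact h ⟨d, hd, hi, hP⟩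

theorem pvCombine (place : List String) (n m x y : Int)
    (hx : 0 ≤ x ∧ x < n) (hy : 0 ≤ y ∧ y < m)
    (_hnadj : ¬ pvAdjBad place n m x y) :
    (∃ d ∈ pvNbrs, (pvInb n m (x + d.1, y + d.2) ∧ pvCell place (x + d.1) (y + d.2) ≠ 'P' ∧
        pvCell place (x + d.1) (y + d.2) ≠ 'X') ∧
      ∃ d' ∈ pvNbrs, pvInb n m (x + d.1 + d'.1, y + d.2 + d'.2) ∧
        pvCell place (x + d.1 + d'.1) (y + d.2 + d'.2) = 'P' ∧
        ((x + d.1 + d'.1, y + d.2 + d'.2) : Int × Int) ≠ (x, y)) ↔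
    (pvFarBad place n m x y ∨ pvDiagBad place n m x y) := by
  constructor
  · rintro ⟨d, hd, ⟨hm1, hm2, hm3⟩, d', hd', hq1, hq2, hq3⟩
    rcases pvNbrs_fact d hd with ⟨e2, e1⟩ | ⟨e1, e2⟩
    · rcases pvNbrs_fact d' hd' with ⟨f2, f1⟩ | ⟨f1, f2⟩
      · have hdd : d'.1 = d.1 := by
          have hne : x + d.1 + d'.1 ≠ x := by
            intro he
            exact hq3 (Prod.ext he (by omega))
          omega
        have ex : x + d.1 + d'.1 = x + d.1 * 2 := by omega
        have ey : y + d.2 + d'.2 = y + d.2 * 2 := by omega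
        rw [ex, ey] at hq1 hq2
        exact Or.inl ⟨d, hd, hm1, hm3, hm2, hq1, hq2⟩
      · have ex : x + d.1 + d'.1 = x + d.1 := by omega
        have ey : y + d.2 + d'.2 = y + d'.2 := by omega
        rw [ex, ey] at hq1 hq2
        have ey2 : y + d.2 = y := by omega
        rw [ey2] at hm1 hm2 hm3
        exact Or.inr ⟨(d.1, d'.2), pvMemDiag _ _ e1 f2, hq1, hq2, Or.inl ⟨hm3, hm2⟩⟩
    · rcases pvNbrs_fact d' hd' with ⟨f2, f1⟩ | ⟨f1, f2⟩
      · have ex : x + d.1 + d'.1 = x + d'.1 := by omega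
        have ey : y + d.2 + d'.2 = y + d.2 := by omega
        rw [ex, ey] at hq1 hq2
        have ex2 : x + d.1 = x := by omega
        rw [ex2] at hm1 hm2 hm3
        exact Or.inr ⟨(d'.1, d.2), pvMemDiag _ _ f1 e2, hq1, hq2, Or.inr ⟨hm3, hm2⟩⟩
      · have hdd : d'.2 = d.2 := by
          have hne : y + d.2 + d'.2 ≠ y := by
            intro he
            exact hq3 (Prod.ext (by omega) he)
          omega
        have ex : x + d.1 + d'.1 = x + d.1 * 2 := by omega
        have ey : y + d.2 + d'.2 = y + d.2 * 2 := by omega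
        rw [ex, ey] at hq1 hq2
        exact Or.inl ⟨d, hd, hm1, hm3, hm2, hq1, hq2⟩
  · rintro (⟨d, hd, hm1, hmX, hmP, hf1, hf2⟩ | ⟨d, hd, hq1, hq2, hside⟩)
    · refine ⟨d, hd, ⟨hm1, hmP, hmX⟩, d, hd, ?_, ?_, ?_⟩
      · rw [show x + d.1 + d.1 = x + d.1 * 2 by ring, show y + d.2 + d.2 = y + d.2 * 2 by ring]
        exact hf1
      · rw [show x + d.1 + d.1 = x + d.1 * 2 by ring, show y + d.2 + d.2 = y + d.2 * 2 by ring]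
        exact hf2
      · have hF := pvNbrs_fact d hd
        intro he
        rw [Prod.mk.injEq] at he
        rcases hF with ⟨h2, h1⟩ | ⟨h1, h2⟩ <;> omega
    · rcases pvDiag_fact d hd with ⟨e1, e2⟩
      rcases hq1 with ⟨ha, hb, hc, he⟩
      rcases hside with ⟨hv1, hv2⟩ | ⟨hh1, hh2⟩
      · refine ⟨(d.1, 0), pvMemNbrs _ _ (Or.inl ⟨rfl, e1⟩), ⟨?_, ?_, ?_⟩,
          (0, d.2), pvMemNbrs _ _ (Or.inr ⟨rfl, e2⟩), ?_, ?_, ?_⟩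
        · exact ⟨by omega, by omega, by omega, by omega⟩
        · rw [show y + (0 : Int) = y by ring]; exact hv2
        · rw [show y + (0 : Int) = y by ring]; exact hv1
        · rw [show x + d.1 + 0 = x + d.1 by ring, show y + 0 + d.2 = y + d.2 by ring]
          exact ⟨ha, hb, hc, he⟩
        · rw [show x + d.1 + 0 = x + d.1 by ring, show y + 0 + d.2 = y + d.2 by ring]
          exact hq2
        · intro he
          rw [Prod.mk.injEq] at he
          omega
      · refine ⟨(0, d.2), pvMemNbrs _ _ (Or.inr ⟨rfl, e2⟩), ⟨?_, ?_, ?_⟩,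
          (d.1, 0), pvMemNbrs _ _ (Or.inl ⟨rfl, e1⟩), ?_, ?_, ?_⟩
        · exact ⟨by omega, by omega, by omega, by omega⟩
        · rw [show x + (0 : Int) = x by ring]; exact hh2
        · rw [show x + (0 : Int) = x by ring]; exact hh1
        · rw [show x + 0 + d.1 = x + d.1 by ring, show y + d.2 + 0 = y + d.2 by ring]
          exact ⟨ha, hb, hc, he⟩
        · rw [show x + 0 + d.1 = x + d.1 by ring, show y + d.2 + 0 = y + d.2 by ring]
          exact hq2
        · intro he
          rw [Prod.mk.injEq] at he
          omega


theorem pvStepEnum (P : Int → Int → Prop) :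
    (∀ i ∈ ([0, 1, 2, 3] : List Nat), P (pvDx.getD i 0) (pvDy.getD i 0)) ↔
      ∀ d ∈ pvNbrs, P d.1 d.2 := by
  simp [pvDx, pvDy, pvNbrs]

theorem pvDiagEnum (P : Int → Int → Prop) :
    (∀ i ∈ ([0, 1, 2, 3] : List Nat), P (pvCx.getD i 0) (pvCy.getD i 0)) ↔
      ∀ d ∈ pvDiag, P d.1 d.2 := by
  simp [pvCx, pvCy, pvDiag]

theorem pvStepBad_to_bad (place : List String) (n m x y : Int) (d : Int × Int)
    (hd : d ∈ pvNbrs) (hs : pvStepBad place n m x y d) : pvBad place n m x y := by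
  rcases hs with ⟨hinb, hP | ⟨hfi, hfP, hmX⟩⟩
  · exact Or.inl ⟨d, hd, hinb, hP⟩
  · by_cases hmP : pvCell place (x + d.1) (y + d.2) = 'P'
    · exact Or.inl ⟨d, hd, hinb, hmP⟩
    · exact Or.inr (Or.inl ⟨d, hd, hinb, hmX, hmP, hfi, hfP⟩)

-- A's per-cell verdict equals ¬pvBad (for cells inside the scanned rectangle)
theorem pvCellCheck_iff (place : List String) (n m x y : Int)
    (hx : 0 ≤ x ∧ x < n) (hy : 0 ≤ y ∧ y < m) :
    pvCellCheck place n m x y = true ↔ ¬ pvBad place n m x y := by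
  by_cases h1 : (pvLoop1 place n m x y [0, 1, 2, 3] []).1 = true
  · have hflag := (pvLoop1_flag place n m x y [0, 1, 2, 3] []).mp h1
    have hflag' : ∀ d ∈ pvNbrs, ¬ pvStepBad place n m x y d :=
      (pvStepEnum (fun a b => ¬ pvStepBad place n m x y (a, b))).mp hflag
    have hAdj : ¬ pvAdjBad place n m x y := by
      rintro ⟨d, hd, hi, hP⟩
      exact hflag' d hd ⟨hi, Or.inl hP⟩
    have hFar : ¬ pvFarBad place n m x y := by
      rintro ⟨d, hd, ha, hb, hc, hdd, he⟩
      exact hflag' d hd ⟨ha, Or.inr ⟨hdd, he, hb⟩⟩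
    have hw := pvLoop1_walls place n m x y [0, 1, 2, 3] [] h1
    show ((pvLoop1 place n m x y [0, 1, 2, 3] []).1 &&
      pvLoop2 place n m x y (pvLoop1 place n m x y [0, 1, 2, 3] []).2 [0, 1, 2, 3]) = true ↔ _
    rw [h1, hw, List.nil_append, Bool.true_and, pvLoop2_iff]
    refine Iff.trans (pvDiagEnum (fun a b => ¬ (pvInb n m (x + a, y + b) ∧
      pvCell place (x + a) (y + b) = 'P' ∧
      ¬ ((x + a, y) ∈ pvWallsOf place n m x y [0, 1, 2, 3] ∧
         (x, y + b) ∈ pvWallsOf place n m x y [0, 1, 2, 3])))) ?_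
    constructor
    · intro hall hbad
      rcases hbad with hA | hF | ⟨d, hd, hinb, hP, hside⟩
      · exact hAdj hA
      · exact hFar hF
      · apply hall d hd
        refine ⟨hinb, hP, ?_⟩
        rintro ⟨hvw, hhw⟩
        rcases pvDiag_fact d hd with ⟨e1, e2⟩
        have hvX := ((pvMem_wallsOf place n m x y (x + d.1, y)
          ⟨(d.1, 0), pvMemNbrs _ _ (Or.inl ⟨rfl, e1⟩), by rw [add_zero]⟩).mp hvw).2
        have hhX := ((pvMem_wallsOf place n m x y (x, y + d.2)
          ⟨(0, d.2), pvMemNbrs _ _ (Or.inr ⟨rfl, e2⟩), by rw [add_zero]⟩).mp hhw).2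
        rcases hside with ⟨hvx, _⟩ | ⟨hhx, _⟩
        · exact hvx hvX
        · exact hhx hhX
    · intro hnbad d hd
      rintro ⟨hinb, hP, hnw⟩
      apply hnbad
      refine Or.inr (Or.inr ⟨d, hd, hinb, hP, ?_⟩)
      rcases pvDiag_fact d hd with ⟨e1, e2⟩
      rcases hinb with ⟨ha, hb, hc, he⟩
      have hvinb : pvInb n m ((x + d.1, y) : Int × Int) := ⟨ha, hb, hy.1, hy.2⟩
      have hhinb : pvInb n m ((x, y + d.2) : Int × Int) := ⟨hx.1, hx.2, hc, he⟩
      have hv_iff := pvMem_wallsOf place n m x y (x + d.1, y)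
        ⟨(d.1, 0), pvMemNbrs _ _ (Or.inl ⟨rfl, e1⟩), by rw [add_zero]⟩
      have hh_iff := pvMem_wallsOf place n m x y (x, y + d.2)
        ⟨(0, d.2), pvMemNbrs _ _ (Or.inr ⟨rfl, e2⟩), by rw [add_zero]⟩
      have hAdj : ¬ pvAdjBad place n m x y := fun hA => hnbad (Or.inl hA)
      have hvP : pvCell place (x + d.1) (y + 0) ≠ 'P' :=
        pvNoAdj place n m x y hAdj (d.1, 0) (pvMemNbrs _ _ (Or.inl ⟨rfl, e1⟩))
          ⟨ha, hb, by omega, by omega⟩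
      have hhP : pvCell place (x + 0) (y + d.2) ≠ 'P' :=
        pvNoAdj place n m x y hAdj (0, d.2) (pvMemNbrs _ _ (Or.inr ⟨rfl, e2⟩))
          ⟨by omega, by omega, hc, he⟩
      rw [add_zero] at hvP
      rw [add_zero] at hhP
      by_cases hvX : pvCell place (x + d.1) y = 'X'
      · by_cases hhX : pvCell place x (y + d.2) = 'X'
        · exact absurd ⟨hv_iff.mpr ⟨hvinb, hvX⟩, hh_iff.mpr ⟨hhinb, hhX⟩⟩ hnw
        · exact Or.inr ⟨hhX, hhP⟩
      · exact Or.inl ⟨hvX, hvP⟩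
  · have h1' : (pvLoop1 place n m x y [0, 1, 2, 3] []).1 = false := by
      cases hb : (pvLoop1 place n m x y [0, 1, 2, 3] []).1
      · rfl
      · exact absurd hb h1
    have hcc : pvCellCheck place n m x y = false := by
      show ((pvLoop1 place n m x y [0, 1, 2, 3] []).1 &&
        pvLoop2 place n m x y (pvLoop1 place n m x y [0, 1, 2, 3] []).2 [0, 1, 2, 3]) = false
      rw [h1', Bool.false_and]
    have hex : ∃ i ∈ ([0, 1, 2, 3] : List Nat),
        pvStepBad place n m x y (pvDx.getD i 0, pvDy.getD i 0) := by
      by_contra hno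
      exact h1 ((pvLoop1_flag place n m x y [0, 1, 2, 3] []).mpr
        (fun i hi hs => hno ⟨i, hi, hs⟩))
    have hbad : pvBad place n m x y := by
      rcases hex with ⟨i, hi, hs⟩
      fin_cases hi <;> exact pvStepBad_to_bad place n m x y _ (by decide) hs
    exact iff_of_false (by simp [hcc]) (not_not_intro hbad)

-- ---- B-side reductions ----

def pvGood (place : List String) (src : Int × Int) (seen : List (Int × Int)) : Prop :=
  src ∈ seen ∧ ∀ p ∈ seen, pvCell place p.1 p.2 = 'P' → p = src

theorem pvExpandCell_found (place : List String) (n m : Int) (src c : Int × Int)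
    (ds : List (Int × Int)) :
    ∀ seen nxt, pvGood place src seen →
      ((pvExpandCell place n m c ds seen nxt).1 = true ↔
        ∃ d ∈ ds, pvInb n m (c.1 + d.1, c.2 + d.2) ∧
          pvCell place (c.1 + d.1) (c.2 + d.2) = 'P' ∧ (c.1 + d.1, c.2 + d.2) ≠ src) := by
  induction ds with
  | nil => intro seen nxt _; simp [pvExpandCell]
  | cons d rest ih =>
    intro seen nxt hg
    simp only [pvExpandCell, List.exists_mem_cons_iff]
    by_cases h1 : 0 ≤ c.1 + d.1 ∧ c.1 + d.1 < n ∧ 0 ≤ c.2 + d.2 ∧ c.2 + d.2 < m ∧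
        (c.1 + d.1, c.2 + d.2) ∉ seen
    · rw [if_pos h1]
      by_cases h2 : pvCell place (c.1 + d.1) (c.2 + d.2) = 'P'
      · rw [if_pos h2]
        have hne : (c.1 + d.1, c.2 + d.2) ≠ src := fun he => h1.2.2.2.2 (he ▸ hg.1)
        constructor
        · intro _; exact Or.inl ⟨⟨h1.1, h1.2.1, h1.2.2.1, h1.2.2.2.1⟩, h2, hne⟩
        · intro _; rfl
      · rw [if_neg h2]
        have hg' : pvGood place src (PySem.Set.add seen (c.1 + d.1, c.2 + d.2)) := by
          refine ⟨(PySem.Set.mem_add _ _ _).mpr (Or.inl hg.1), ?_⟩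
          intro p hp hP
          rcases (PySem.Set.mem_add _ _ _).mp hp with h | rfl
          · exact hg.2 p h hP
          · exact absurd hP h2
        split_ifs with h3 <;> rw [ih _ _ hg'] <;> simp [h2]
    · rw [if_neg h1]
      rw [ih _ _ hg]
      have hΦ : ¬ (pvInb n m (c.1 + d.1, c.2 + d.2) ∧
          pvCell place (c.1 + d.1) (c.2 + d.2) = 'P' ∧ (c.1 + d.1, c.2 + d.2) ≠ src) := by
        rintro ⟨hinb, hP, hne⟩
        rcases hinb with ⟨a, b, cc, dd⟩
        have hin : (c.1 + d.1, c.2 + d.2) ∈ seen := by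
          by_contra hnin
          exact h1 ⟨a, b, cc, dd, hnin⟩
        exact hne (hg.2 _ hin hP)
      tauto

theorem pvExpandCell_good (place : List String) (n m : Int) (src c : Int × Int)
    (ds : List (Int × Int)) :
    ∀ seen nxt, pvGood place src seen → (pvExpandCell place n m c ds seen nxt).1 = false →
      pvGood place src (pvExpandCell place n m c ds seen nxt).2.1 := by
  induction ds with
  | nil => intro seen nxt hg _; simpa [pvExpandCell] using hg
  | cons d rest ih =>
    intro seen nxt hg hf
    simp only [pvExpandCell] at hf ⊢
    by_cases h1 : 0 ≤ c.1 + d.1 ∧ c.1 + d.1 < n ∧ 0 ≤ c.2 + d.2 ∧ c.2 + d.2 < m ∧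
        (c.1 + d.1, c.2 + d.2) ∉ seen
    · rw [if_pos h1] at hf ⊢
      by_cases h2 : pvCell place (c.1 + d.1) (c.2 + d.2) = 'P'
      · rw [if_pos h2] at hf; exact absurd hf (by simp)
      · rw [if_neg h2] at hf ⊢
        have hg' : pvGood place src (PySem.Set.add seen (c.1 + d.1, c.2 + d.2)) := by
          refine ⟨(PySem.Set.mem_add _ _ _).mpr (Or.inl hg.1), ?_⟩
          intro p hp hP
          rcases (PySem.Set.mem_add _ _ _).mp hp with h | rfl
          · exact hg.2 p h hP
          · exact absurd hP h2
        split_ifs at hf ⊢ with h3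
        · exact ih _ _ hg' hf
        · exact ih _ _ hg' hf
    · rw [if_neg h1] at hf ⊢
      exact ih _ _ hg hf

theorem pvExpandCell_nxt (place : List String) (n m : Int) (c : Int × Int)
    (ds : List (Int × Int)) (hnd : ds.Nodup) :
    ∀ seen nxt, (pvExpandCell place n m c ds seen nxt).1 = false →
      ∀ q, q ∈ (pvExpandCell place n m c ds seen nxt).2.2 ↔
        q ∈ nxt ∨ ∃ d ∈ ds, q = (c.1 + d.1, c.2 + d.2) ∧ pvInb n m q ∧ q ∉ seen ∧
          pvCell place q.1 q.2 ≠ 'P' ∧ pvCell place q.1 q.2 ≠ 'X' := by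
  induction ds with
  | nil => intro seen nxt _ q; simp [pvExpandCell]
  | cons d rest ih =>
    rcases List.nodup_cons.mp hnd with ⟨hdn, hnd'⟩
    intro seen nxt hf q
    simp only [pvExpandCell] at hf ⊢
    by_cases h1 : 0 ≤ c.1 + d.1 ∧ c.1 + d.1 < n ∧ 0 ≤ c.2 + d.2 ∧ c.2 + d.2 < m ∧
        (c.1 + d.1, c.2 + d.2) ∉ seen
    · rw [if_pos h1] at hf ⊢
      by_cases h2 : pvCell place (c.1 + d.1) (c.2 + d.2) = 'P'
      · rw [if_pos h2] at hf; exact absurd hf (by simp)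
      · rw [if_neg h2] at hf ⊢
        have hseen : ∀ d' ∈ rest, ((c.1 + d'.1, c.2 + d'.2) : Int × Int) ∉ PySem.Set.add seen (c.1 + d.1, c.2 + d.2) ↔
            ((c.1 + d'.1, c.2 + d'.2) : Int × Int) ∉ seen := by
          intro d' hd'
          rw [PySem.Set.mem_add]
          have : ((c.1 + d'.1, c.2 + d'.2) : Int × Int) ≠ (c.1 + d.1, c.2 + d.2) := by
            intro he
            apply hdn
            have h1' : d'.1 = d.1 := by
              have := congrArg Prod.fst he; simpa using this
            have h2' : d'.2 = d.2 := by
              have := congrArg Prod.snd he; simpa using this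
            have : d' = d := Prod.ext h1' h2'
            exact this ▸ hd'
          tauto
        split_ifs at hf ⊢ with h3
        · rw [ih hnd' _ _ hf q]
          simp only [List.mem_append, List.mem_singleton, List.exists_mem_cons_iff]
          constructor
          · rintro ((hq | rfl) | ⟨d', hd', rfl, hinb, hnin, hP, hX⟩)
            · exact Or.inl hq
            · exact Or.inr (Or.inl ⟨rfl, ⟨h1.1, h1.2.1, h1.2.2.1, h1.2.2.2.1⟩, h1.2.2.2.2, h2, h3⟩)
            · exact Or.inr (Or.inr ⟨d', hd', rfl, hinb, (hseen d' hd').mp hnin, hP, hX⟩)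
          · rintro (hq | ⟨rfl, hinb, hnin, hP, hX⟩ | ⟨d', hd', rfl, hinb, hnin, hP, hX⟩)
            · exact Or.inl (Or.inl hq)
            · exact Or.inl (Or.inr rfl)
            · exact Or.inr ⟨d', hd', rfl, hinb, (hseen d' hd').mpr hnin, hP, hX⟩
        · simp only [not_not] at h3
          rw [ih hnd' _ _ hf q]
          simp only [List.exists_mem_cons_iff]
          constructor
          · rintro (hq | ⟨d', hd', rfl, hinb, hnin, hP, hX⟩)
            · exact Or.inl hq
            · exact Or.inr (Or.inr ⟨d', hd', rfl, hinb, (hseen d' hd').mp hnin, hP, hX⟩)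
          · rintro (hq | ⟨rfl, hinb, hnin, hP, hX⟩ | ⟨d', hd', rfl, hinb, hnin, hP, hX⟩)
            · exact Or.inl hq
            · exact absurd h3 hX
            · exact Or.inr ⟨d', hd', rfl, hinb, (hseen d' hd').mpr hnin, hP, hX⟩
    · rw [if_neg h1] at hf ⊢
      rw [ih hnd' _ _ hf q]
      simp only [List.exists_mem_cons_iff]
      have hΦ : ¬ (q = ((c.1 + d.1, c.2 + d.2) : Int × Int) ∧ pvInb n m q ∧ q ∉ seen ∧
          pvCell place q.1 q.2 ≠ 'P' ∧ pvCell place q.1 q.2 ≠ 'X') := by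
        rintro ⟨rfl, hinb, hnin, _, _⟩
        rcases hinb with ⟨a, b, cc, dd⟩
        exact h1 ⟨a, b, cc, dd, hnin⟩
      tauto

theorem pvExpandFrontier_found (place : List String) (n m : Int) (src : Int × Int)
    (fr : List (Int × Int)) :
    ∀ seen nxt, pvGood place src seen →
      ((pvExpandFrontier place n m fr seen nxt).1 = true ↔
        ∃ c ∈ fr, ∃ d ∈ pvNbrs, pvInb n m (c.1 + d.1, c.2 + d.2) ∧
          pvCell place (c.1 + d.1) (c.2 + d.2) = 'P' ∧ (c.1 + d.1, c.2 + d.2) ≠ src) := by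
  induction fr with
  | nil => intro seen nxt _; simp [pvExpandFrontier]
  | cons c rest ih =>
    intro seen nxt hg
    simp only [pvExpandFrontier, List.exists_mem_cons_iff]
    by_cases h1 : (pvExpandCell place n m c pvNbrs seen nxt).1 = true
    · rw [if_pos h1]
      simp only [h1, true_iff]
      exact Or.inl ((pvExpandCell_found place n m src c pvNbrs seen nxt hg).mp h1)
    · rw [if_neg h1]
      rw [ih _ _ (pvExpandCell_good place n m src c pvNbrs seen nxt hg (Bool.not_eq_true _ ▸ h1))]
      have : ¬ ∃ d ∈ pvNbrs, pvInb n m (c.1 + d.1, c.2 + d.2) ∧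
          pvCell place (c.1 + d.1) (c.2 + d.2) = 'P' ∧ (c.1 + d.1, c.2 + d.2) ≠ src := by
        rw [← pvExpandCell_found place n m src c pvNbrs seen nxt hg]
        exact h1
      simp only [this, false_or]

-- B's per-cell verdict equals pvBad (for cells inside the scanned rectangle)
theorem pvNearP_iff (place : List String) (n m x y : Int)
    (hx : 0 ≤ x ∧ x < n) (hy : 0 ≤ y ∧ y < m) :
    pvNearP place n m x y = true ↔ pvBad place n m x y := by
  have hg0 : pvGood place (x, y) [(x, y)] := by
    refine ⟨List.mem_singleton_self _, ?_⟩
    intro p hp _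
    simpa using hp
  have hofl : PySem.Set.ofList [((x : Int), (y : Int))] = [(x, y)] :=
    PySem.Set.ofList_eq_self_of_nodup [(x, y)] (List.nodup_singleton _)
  have hECf := pvExpandCell_found place n m (x, y) (x, y) pvNbrs [(x, y)] [] hg0
  unfold pvNearP
  rw [hofl]
  simp only [pvLevels, pvExpandFrontier]
  by_cases hf1 : (pvExpandCell place n m (x, y) pvNbrs [(x, y)] []).1 = true
  · rw [if_pos (by simp [hf1])]
    rcases hECf.mp hf1 with ⟨d, hd, h1, h2, _⟩
    simp only [true_iff]
    exact Or.inl ⟨d, hd, h1, h2⟩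
  · have hAdj : ¬ pvAdjBad place n m x y := by
      rintro ⟨d, hd, h1, h2⟩
      exact hf1 (hECf.mpr ⟨d, hd, h1, h2, pvOff_ne d hd x y⟩)
    have hfb : (pvExpandCell place n m (x, y) pvNbrs [(x, y)] []).1 = false :=
      Bool.not_eq_true _ ▸ hf1
    rw [if_neg hf1, if_neg (by simp)]
    have hg1 : pvGood place (x, y) (pvExpandCell place n m (x, y) pvNbrs [(x, y)] []).2.1 :=
      pvExpandCell_good place n m (x, y) (x, y) pvNbrs [(x, y)] [] hg0 hfb
    have hnxt := pvExpandCell_nxt place n m (x, y) pvNbrs (by decide) [(x, y)] [] hfb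
    have hEFf := pvExpandFrontier_found place n m (x, y)
      (pvExpandCell place n m (x, y) pvNbrs [(x, y)] []).2.2
      (pvExpandCell place n m (x, y) pvNbrs [(x, y)] []).2.1 [] hg1
    by_cases hf2 : (pvExpandFrontier place n m
        (pvExpandCell place n m (x, y) pvNbrs [(x, y)] []).2.2
        (pvExpandCell place n m (x, y) pvNbrs [(x, y)] []).2.1 []).1 = true
    · rw [if_pos hf2]
      simp only [true_iff]
      rcases hEFf.mp hf2 with ⟨c, hc, d', hd', hq1, hq2, hq3⟩
      rcases (hnxt c).mp hc with hce | ⟨d, hd, rfl, hinb, _, hP, hX⟩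
      · exact absurd hce (List.not_mem_nil)
      · refine Or.inr ((pvCombine place n m x y hx hy hAdj).mp
          ⟨d, hd, ⟨hinb, hP, hX⟩, d', hd', hq1, hq2, hq3⟩)
    · rw [if_neg hf2]
      constructor
      · intro h
        exact absurd h (by simp)
      · intro hbad
        exfalso
        rcases hbad with hA | hrest
        · exact hAdj hA
        · apply hf2
          apply hEFf.mpr
          rcases (pvCombine place n m x y hx hy hAdj).mpr hrest with
            ⟨d, hd, ⟨hinb, hP, hX⟩, d', hd', hq1, hq2, hq3⟩
          refine ⟨(x + d.1, y + d.2), ?_, d', hd', hq1, hq2, hq3⟩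
          exact (hnxt _).mpr (Or.inr ⟨d, hd, rfl, hinb, by simp [pvOff_ne d hd x y], hP, hX⟩)


-- ---- assembling the whole-place verdicts ----

theorem pvRowCheck_iff (place : List String) (n m x : Int) (ys : List Int) :
    pvRowCheck place n m x ys = true ↔
      ∀ y ∈ ys, pvCell place x y = 'P' → pvCellCheck place n m x y = true := by
  induction ys with
  | nil => simp [pvRowCheck]
  | cons y rest ih =>
    simp only [pvRowCheck]
    split_ifs with h1 h2 <;> simp_all

theorem pvPlaceCheck_iff (place : List String) (n m : Int) (xs : List Int) :
    pvPlaceCheck place n m xs = true ↔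
      ∀ x ∈ xs, pvRowCheck place n m x (PySem.List.pyRange 0 m 1) = true := by
  induction xs with
  | nil => simp [pvPlaceCheck]
  | cons x rest ih =>
    simp only [pvPlaceCheck]
    split_ifs with h1 <;> simp_all

theorem pvPlace_eq (place : List String) (n m : Int) :
    (if pvPlaceCheck place n m (PySem.List.pyRange 0 n 1) then (1 : Int) else 0) =
    (if (PySem.List.pyRange 0 n 1).any (fun x =>
        (PySem.List.pyRange 0 m 1).any (fun y =>
          pvCell place x y = 'P' && pvNearP place n m x y)) then 0 else 1) := by
  have hA := pvPlaceCheck_iff place n m (PySem.List.pyRange 0 n 1)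
  by_cases h : pvPlaceCheck place n m (PySem.List.pyRange 0 n 1) = true
  · rw [if_pos h]
    have hno : ¬ ((PySem.List.pyRange 0 n 1).any (fun x =>
        (PySem.List.pyRange 0 m 1).any (fun y =>
          pvCell place x y = 'P' && pvNearP place n m x y))) = true := by
      rw [List.any_eq_true]
      rintro ⟨x, hxmem, hx2⟩
      rw [List.any_eq_true] at hx2
      rcases hx2 with ⟨y, hymem, h3⟩
      simp only [Bool.and_eq_true, decide_eq_true_eq] at h3
      have hxb := PySem.List.mem_pyRange_one.mp hxmem
      have hyb := PySem.List.mem_pyRange_one.mp hymem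
      have hbad := (pvNearP_iff place n m x y ⟨hxb.1, hxb.2⟩ ⟨hyb.1, hyb.2⟩).mp h3.2
      have hcell := ((pvRowCheck_iff place n m x _).mp (hA.mp h x hxmem) y hymem) h3.1
      exact ((pvCellCheck_iff place n m x y ⟨hxb.1, hxb.2⟩ ⟨hyb.1, hyb.2⟩).mp hcell) hbad
    rw [if_neg hno]
  · rw [if_neg h]
    have hyes : ((PySem.List.pyRange 0 n 1).any (fun x =>
        (PySem.List.pyRange 0 m 1).any (fun y =>
          pvCell place x y = 'P' && pvNearP place n m x y))) = true := by
      by_contra hno2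
      apply h
      apply hA.mpr
      intro x hxmem
      rw [pvRowCheck_iff]
      intro y hymem hP
      have hxb := PySem.List.mem_pyRange_one.mp hxmem
      have hyb := PySem.List.mem_pyRange_one.mp hymem
      rw [pvCellCheck_iff place n m x y ⟨hxb.1, hxb.2⟩ ⟨hyb.1, hyb.2⟩]
      intro hbad
      apply hno2
      rw [List.any_eq_true]
      refine ⟨x, hxmem, ?_⟩
      rw [List.any_eq_true]
      refine ⟨y, hymem, ?_⟩
      simp only [Bool.and_eq_true, decide_eq_true_eq]
      exact ⟨hP, (pvNearP_iff place n m x y ⟨hxb.1, hxb.2⟩ ⟨hyb.1, hyb.2⟩).mpr hbad⟩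
    rw [if_pos hyes]

-- ===== VERDICT (by name: the statement is the Claim_ definition above) =====
theorem solution_spec : Claim_equal_solution := by
  intro places _ _
  unfold Spec_solution solution solution_alt
  exact List.map_congr_left (fun place _ => pvPlace_eq place places.length (places.headD []).length)
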